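-- pv_equiv track=rewrite | github.com/Gautamtanejaa/Codemate-Probelm-3--A-deep-research-agent | query.py | _decompose_query
-- ===== SOURCE A (Python) =====
-- from typing import List, Dict, Any, Optional
--
-- def _decompose_query(query: str) -> List[str]:
--     """Very light heuristic decomposition: split by punctuation and conjunctions."""
--     parts = []
--     for seg in query.replace("?", ".").split("."):
--         seg = seg.strip()
--         if not seg:
--             continue
--         # Further split on 'and', 'then'
--         for sub in seg.replace(",", ";").split(";"):
--             sub = sub.strip()
--             if sub:
--                 parts.append(sub)
--     return parts[:4] or [query]
-- ===== SOURCE B (Python) =====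
-- from typing import List
--
-- def _decompose_query(query: str) -> List[str]:
--     """Single character scan: flush a buffer at each of . ? , ; keep stripped nonempty pieces."""
--     parts = []
--     buf = []
--     for ch in query + ".":
--         if ch in ".?,;":
--             piece = "".join(buf).strip()
--             if piece:
--                 parts.append(piece)
--             buf = []
--         else:
--             buf.append(ch)
--     return parts[:4] or [query]
-- ===== Notes on version B (the rewrite author's own statement) =====
-- stated objective: alternative
-- what changed: Replaced A's nested replace/split/strip passes (map one punctuation mark onto another, split, then per segment map-and-split again, stripping at both levels) by a single left-to-right character scan that flushes a buffer at each of the four delimiter characters and keeps the stripped nonempty pieces.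
import Mathlib
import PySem

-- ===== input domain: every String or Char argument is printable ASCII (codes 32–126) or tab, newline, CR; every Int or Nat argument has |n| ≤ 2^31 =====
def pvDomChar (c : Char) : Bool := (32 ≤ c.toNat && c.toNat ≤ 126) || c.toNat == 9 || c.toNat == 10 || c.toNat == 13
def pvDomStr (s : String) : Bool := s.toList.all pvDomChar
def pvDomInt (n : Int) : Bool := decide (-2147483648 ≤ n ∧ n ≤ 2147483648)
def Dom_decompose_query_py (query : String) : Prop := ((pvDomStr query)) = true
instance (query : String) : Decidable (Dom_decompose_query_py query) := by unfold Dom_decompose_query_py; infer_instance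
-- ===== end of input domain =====

-- B replaces A's nested replace/split/strip passes by a single left-to-right character
-- scan that flushes a buffer at each of '.','?',',',';' (objective: alternative decomposition, one pass).

-- ===== PORT A =====
-- literal transliteration of A: query.replace("?",".").split("."), strip each segment,
-- skip empty ones, then seg.replace(",",";").split(";"), strip, append nonempty; parts[:4] or [query]
def decompose_query_py (query : String) : List String :=
  let parts : List String :=
    (PySem.Chars.splitOn (PySem.Chars.replace query.toList ['?'] ['.']) ['.']).foldl
      (fun parts seg =>
        let seg := PySem.Chars.strip seg
        if seg = [] then parts
        else
          (PySem.Chars.splitOn (PySem.Chars.replace seg [','] [';']) [';']).foldl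
            (fun parts sub =>
              let sub := PySem.Chars.strip sub
              if sub = [] then parts else parts ++ [String.ofList sub]) parts) []
  let r := parts.take 4
  if r = [] then [query] else r

-- ===== PORT B =====
-- literal transliteration of Source B: one fold over the characters of query + "." with a
-- (parts, buf) state; 'ch in ".?,;"' on a single char is ported as the four-way equality test
def decompose_query_py_alt (query : String) : List String :=
  let st : List String × List Char :=
    (query ++ ".").toList.foldl
      (fun (st : List String × List Char) ch =>
        if ch == '.' || ch == '?' || ch == ',' || ch == ';' then
          let piece := PySem.Chars.strip st.2
          (if piece = [] then st.1 else st.1 ++ [String.ofList piece], [])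
        else (st.1, st.2 ++ [ch])) ([], [])
  let r := st.1.take 4
  if r = [] then [query] else r

-- ===== PRECONDITION & SPEC =====
def Spec_decompose_query_py (query : String) (out : List String) : Prop := out = decompose_query_py_alt query
instance (query : String) (out : List String) : Decidable (Spec_decompose_query_py query out) := by unfold Spec_decompose_query_py; infer_instance

-- ===== CLAIM (what is proved, stated in full; the proofs are below) =====
def Claim_equal_decompose_query_py : Prop := ∀ (query : String), Dom_decompose_query_py query → Spec_decompose_query_py query (decompose_query_py query)

-- ===== LEMMAS AND PROOFS =====

def pvSplit (p : Char → Bool) : List Char → List Char × List (List Char)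
  | [] => ([], [])
  | c :: t =>
    if p c then ([], (pvSplit p t).1 :: (pvSplit p t).2)
    else (c :: (pvSplit p t).1, (pvSplit p t).2)

theorem pv_splitOn_go (a : Char) : ∀ (fuel : Nat) (m cur : List Char) (acc : List (List Char)),
    m.length < fuel →
    PySem.Chars.splitOn.go [a] fuel m cur acc =
      acc.reverse ++ (cur.reverse ++ (pvSplit (· == a) m).1) :: (pvSplit (· == a) m).2 := by
  intro fuel
  induction fuel with
  | zero => intro m cur acc h; omega
  | succ fuel ih =>
    intro m cur acc h
    cases m with
    | nil => simp [PySem.Chars.splitOn.go, pvSplit]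
    | cons c rest =>
      by_cases hc : c = a
      · subst hc
        rw [PySem.Chars.splitOn.go]
        simp only [List.isPrefixOf, beq_self_eq_true, Bool.true_and, if_pos, List.length_cons,
          List.drop_succ_cons, List.length_nil, List.drop_zero]
        rw [ih rest [] (cur.reverse :: acc) (by simpa using Nat.lt_of_succ_lt_succ h)]
        simp [pvSplit]
      · rw [PySem.Chars.splitOn.go]
        have hpre : [a].isPrefixOf (c :: rest) = false := by
          simp [List.isPrefixOf]
          exact fun hh => absurd hh.symm hc
        rw [hpre]
        simp only [Bool.false_eq_true, if_false]
        rw [ih rest (c :: cur) acc (by simpa using Nat.lt_of_succ_lt_succ h)]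
        have hbc : (c == a) = false := by simpa using hc
        simp [pvSplit, hbc]

theorem pv_splitOn (m : List Char) (a : Char) :
    PySem.Chars.splitOn m [a] = (pvSplit (· == a) m).1 :: (pvSplit (· == a) m).2 := by
  rw [PySem.Chars.splitOn, pv_splitOn_go a (m.length + 1) m [] [] (by omega)]
  simp

theorem pv_replace_go (a b : Char) : ∀ (fuel : Nat) (m acc : List Char),
    m.length ≤ fuel →
    PySem.Chars.replace.go [a] [b] fuel m acc =
      acc.reverse ++ m.map (fun c => if c == a then b else c) := by
  intro fuel
  induction fuel with
  | zero =>
    intro m acc h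
    rw [List.length_eq_zero_iff.mp (Nat.le_zero.mp h)]
    simp [PySem.Chars.replace.go]
  | succ fuel ih =>
    intro m acc h
    cases m with
    | nil => simp [PySem.Chars.replace.go]
    | cons c rest =>
      by_cases hc : c = a
      · subst hc
        rw [PySem.Chars.replace.go]
        simp only [List.isPrefixOf, beq_self_eq_true, Bool.true_and, if_pos, List.length_cons,
          List.drop_succ_cons, List.length_nil, List.drop_zero]
        rw [ih rest ([b].reverse ++ acc) (by simpa using Nat.le_of_succ_le_succ h)]
        simp
      · rw [PySem.Chars.replace.go]
        have hpre : [a].isPrefixOf (c :: rest) = false := by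
          simp [List.isPrefixOf]
          exact fun hh => absurd hh.symm hc
        rw [hpre]
        simp only [Bool.false_eq_true, if_false]
        rw [ih rest (c :: acc) (by simpa using Nat.le_of_succ_le_succ h)]
        simp [hc]

theorem pv_replace (m : List Char) (a b : Char) :
    PySem.Chars.replace m [a] [b] = m.map (fun c => if c == a then b else c) := by
  rw [PySem.Chars.replace]
  simp only [List.isEmpty_cons, Bool.false_eq_true, if_false]
  rw [pv_replace_go a b m.length m [] (le_refl _)]
  simp

def pvFull (p : Char → Bool) (m : List Char) : List (List Char) :=
  (pvSplit p m).1 :: (pvSplit p m).2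

def pvQ1 (c : Char) : Bool := c == '.' || c == '?'
def pvQ2 (c : Char) : Bool := c == ';' || c == ','
def pvQ (c : Char) : Bool := pvQ1 c || pvQ2 c

theorem pv_split_map (p : Char → Bool) (f : Char → Char) (m : List Char) :
    pvSplit p (m.map f) =
      ((pvSplit (fun c => p (f c)) m).1.map f, (pvSplit (fun c => p (f c)) m).2.map (List.map f)) := by
  induction m with
  | nil => simp [pvSplit]
  | cons c t ih =>
    by_cases hc : p (f c) = true
    · simp [pvSplit, hc, ih]
    · simp only [Bool.not_eq_true] at hc
      simp [pvSplit, hc, ih]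

theorem pv_mem_full_not (p : Char → Bool) (m : List Char) :
    ∀ s ∈ pvFull p m, ∀ c ∈ s, p c = false := by
  induction m with
  | nil => simp [pvFull, pvSplit]
  | cons c t ih =>
    intro s hs d hd
    by_cases hc : p c = true
    · simp only [pvFull, pvSplit, hc, if_true, List.mem_cons] at hs
      rcases hs with h1 | h1 | h1
      · subst h1; simp at hd
      · exact ih s (by simp [pvFull, h1]) d hd
      · exact ih s (by simp [pvFull, h1]) d hd
    · simp only [Bool.not_eq_true] at hc
      simp only [pvFull, pvSplit, hc, Bool.false_eq_true, if_false, List.mem_cons] at hs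
      rcases hs with h1 | h1
      · subst h1
        rcases List.mem_cons.mp hd with h2 | h2
        · subst h2; exact hc
        · exact ih (pvSplit p t).1 (by simp [pvFull]) d h2
      · exact ih s (by simp [pvFull, h1]) d hd

theorem pv_split_nodelim (p : Char → Bool) (m : List Char) (h : ∀ c ∈ m, p c = false) :
    pvSplit p m = (m, []) := by
  induction m with
  | nil => simp [pvSplit]
  | cons c t ih =>
    have hc := h c (by simp)
    simp [pvSplit, hc, ih (fun d hd => h d (by simp [hd]))]

theorem pvQ1_eq (c : Char) : ((if c == '?' then '.' else c) == '.') = pvQ1 c := by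
  by_cases h : c = '?'
  · subst h; simp [pvQ1]
  · simp [pvQ1, h]

theorem pvQ2_eq (c : Char) : ((if c == ',' then ';' else c) == ';') = pvQ2 c := by
  by_cases h : c = ','
  · subst h; simp [pvQ2]
  · simp [pvQ2, h]

theorem pv_map_id_of_full (p : Char → Bool) (f : Char → Char)
    (hf : ∀ c, p c = false → f c = c) (l : List Char) :
    ((pvFull p l).map (List.map f)) = pvFull p l := by
  have : ∀ s ∈ pvFull p l, s.map f = s := by
    intro s hs
    have := pv_mem_full_not p l s hs
    calc s.map f = s.map id := List.map_congr_left (fun c hc => hf c (this c hc))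
    _ = s := List.map_id s
  calc (pvFull p l).map (List.map f) = (pvFull p l).map id := List.map_congr_left this
  _ = _ := List.map_id _

theorem pvA_gen (l : List Char) (a b : Char) (p : Char → Bool)
    (hp : ∀ c, ((if c == a then b else c) == b) = p c) :
    PySem.Chars.splitOn (PySem.Chars.replace l [a] [b]) [b] = pvFull p l := by
  rw [pv_replace, pv_splitOn]
  have h1 := pv_split_map (· == b) (fun c => if c == a then b else c) l
  simp only [h1]
  have hpe : (fun c => ((if c == a then b else c) == b)) = p := funext hp
  rw [hpe]
  have := pv_map_id_of_full p (fun c => if c == a then b else c)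
    (fun c hc => by
      by_cases hca : c = a
      · subst hca; have h2 := hp c; simp at h2; rw [hc] at h2; cases h2
      · simp [hca]) l
  simpa [pvFull] using this

theorem pvA_outer (l : List Char) :
    PySem.Chars.splitOn (PySem.Chars.replace l ['?'] ['.']) ['.'] = pvFull pvQ1 l :=
  pvA_gen l '?' '.' pvQ1 pvQ1_eq

theorem pvA_inner (s : List Char) :
    PySem.Chars.splitOn (PySem.Chars.replace s [','] [';']) [';'] = pvFull pvQ2 s :=
  pvA_gen s ',' ';' pvQ2 pvQ2_eq

theorem pv_compose (l : List Char) :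
    pvFull pvQ l = (pvFull pvQ1 l).flatMap (pvFull pvQ2) := by
  induction l with
  | nil => simp [pvFull, pvSplit]
  | cons c t ih =>
    by_cases h1 : pvQ1 c = true
    · have hq : pvQ c = true := by simp [pvQ, h1]
      simp only [pvFull, pvSplit, hq, h1, if_true, List.flatMap_cons]
      simp only [pvFull] at ih
      simp [pvFull, pvSplit, ih]
    · simp only [Bool.not_eq_true] at h1
      by_cases h2 : pvQ2 c = true
      · have hq : pvQ c = true := by simp [pvQ, h1, h2]
        simp only [pvFull, pvSplit, hq, h1, Bool.false_eq_true, if_true, if_false, List.flatMap_cons]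
        simp only [pvFull] at ih
        simp [pvFull, pvSplit, h2, ih]
      · simp only [Bool.not_eq_true] at h2
        have hq : pvQ c = false := by simp [pvQ, h1, h2]
        simp only [pvFull, pvSplit, hq, h1, h2, Bool.false_eq_true, if_false, List.flatMap_cons]
        simp only [pvFull] at ih
        cases hsp : pvSplit pvQ2 (pvSplit pvQ1 t).1 with
        | mk s2 r2 =>
        simp only [pvSplit, h2, Bool.false_eq_true, if_false, hsp, List.cons_append]
        simp only [List.flatMap_cons, pvFull, hsp, List.cons_append] at ih
        have e1 : (pvSplit pvQ t).1 = s2 := (List.cons.injEq _ _ _ _ ▸ ih).1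
        have e2 : (pvSplit pvQ t).2 = r2 ++ (pvSplit pvQ1 t).2.flatMap (pvFull pvQ2) := (List.cons.injEq _ _ _ _ ▸ ih).2
        simp [e1, e2]

def pvPiecesC (p : Char → Bool) (m : List Char) : List (List Char) :=
  ((pvFull p m).map PySem.Chars.strip).filter (· ≠ [])

theorem pv_strip_cons (c : Char) (t : List Char) (hc : PySem.Chars.isspace c = true) :
    PySem.Chars.strip (c :: t) = PySem.Chars.strip t := by
  simp [PySem.Chars.strip, PySem.Chars.lstrip, List.dropWhile_cons, hc]

theorem pv_rstrip_snoc (c : Char) (t : List Char) (hc : PySem.Chars.isspace c = true) :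
    PySem.Chars.rstrip (t ++ [c]) = PySem.Chars.rstrip t := by
  simp [PySem.Chars.rstrip, List.dropWhile_cons, hc]

theorem pv_strip_snoc (c : Char) (t : List Char) (hc : PySem.Chars.isspace c = true) :
    PySem.Chars.strip (t ++ [c]) = PySem.Chars.strip t := by
  induction t with
  | nil => simp [PySem.Chars.strip, PySem.Chars.lstrip, PySem.Chars.rstrip, List.dropWhile_cons, hc]
  | cons d t ih =>
    by_cases hd : PySem.Chars.isspace d = true
    · rw [List.cons_append, pv_strip_cons d _ hd, pv_strip_cons d _ hd, ih]
    · simp only [Bool.not_eq_true] at hd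
      simp only [PySem.Chars.strip, PySem.Chars.lstrip, List.cons_append, List.dropWhile_cons, hd,
        Bool.false_eq_true, if_false]
      rw [← List.cons_append]
      exact pv_rstrip_snoc c _ hc

theorem pvQ2_space (c : Char) (h : PySem.Chars.isspace c = true) : pvQ2 c = false := by
  by_cases h3 : c = ','; · subst h3; simp [PySem.Chars.isspace] at h
  by_cases h4 : c = ';'; · subst h4; simp [PySem.Chars.isspace] at h
  simp [pvQ2, h3, h4]

def pvSnocLast (l : List (List Char)) (c : Char) : List (List Char) :=
  match l with
  | [] => []
  | [x] => [x ++ [c]]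
  | x :: y :: xs => x :: pvSnocLast (y :: xs) c

theorem pv_full_snoc (p : Char → Bool) (c : Char) (hc : p c = false) (m : List Char) :
    pvFull p (m ++ [c]) = pvSnocLast (pvFull p m) c := by
  induction m with
  | nil => simp [pvFull, pvSplit, pvSnocLast, hc]
  | cons d t ih =>
    by_cases hd : p d = true
    · simp only [pvFull, pvSplit, hd, if_true, List.cons_append] at ih ⊢
      rw [show ∀ (x : List Char) (y : List (List Char)), pvSnocLast (([] : List Char) :: x :: y) c = [] :: pvSnocLast (x :: y) c from fun x y => rfl]
      simp only [← ih]
    · simp only [Bool.not_eq_true] at hd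
      simp only [pvFull, pvSplit, hd, Bool.false_eq_true, if_false, List.cons_append] at ih ⊢
      cases hr : (pvSplit p t).2 with
      | nil =>
        rw [hr] at ih
        simp only [pvSnocLast] at ih ⊢
        have e1 : (pvSplit p (t ++ [c])).1 = (pvSplit p t).1 ++ [c] := (List.cons.injEq _ _ _ _ ▸ ih).1
        have e2 : (pvSplit p (t ++ [c])).2 = [] := (List.cons.injEq _ _ _ _ ▸ ih).2
        simp [e1, e2, pvSnocLast]
      | cons y ys =>
        rw [hr] at ih
        simp only [pvSnocLast] at ih ⊢
        have e1 : (pvSplit p (t ++ [c])).1 = (pvSplit p t).1 := (List.cons.injEq _ _ _ _ ▸ ih).1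
        have e2 : (pvSplit p (t ++ [c])).2 = pvSnocLast (y :: ys) c := (List.cons.injEq _ _ _ _ ▸ ih).2
        simp [e1, e2, pvSnocLast]

theorem pv_map_strip_snoc (c : Char) (hc : PySem.Chars.isspace c = true) (l : List (List Char)) :
    (pvSnocLast l c).map PySem.Chars.strip = l.map PySem.Chars.strip := by
  induction l with
  | nil => simp [pvSnocLast]
  | cons x xs ih =>
    cases xs with
    | nil => simp [pvSnocLast, pv_strip_snoc c x hc]
    | cons y ys => simp only [pvSnocLast, List.map_cons] at ih ⊢; rw [ih]

theorem pv_pieces_snoc (p : Char → Bool) (c : Char) (hc : PySem.Chars.isspace c = true)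
    (hp : p c = false) (m : List Char) : pvPiecesC p (m ++ [c]) = pvPiecesC p m := by
  simp only [pvPiecesC, pv_full_snoc p c hp m, pv_map_strip_snoc c hc]

theorem pv_pieces_cons (p : Char → Bool) (c : Char) (hc : PySem.Chars.isspace c = true)
    (hp : p c = false) (t : List Char) : pvPiecesC p (c :: t) = pvPiecesC p t := by
  simp only [pvPiecesC, pvFull, pvSplit, hp, Bool.false_eq_true, if_false, List.map_cons,
    pv_strip_cons c _ hc]

theorem pv_pieces_append_space (p : Char → Bool) (hsp : ∀ c, PySem.Chars.isspace c = true → p c = false)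
    (u w : List Char) (hw : ∀ c ∈ w, PySem.Chars.isspace c = true) :
    pvPiecesC p (u ++ w) = pvPiecesC p u := by
  induction w using List.reverseRecOn with
  | nil => simp
  | append_singleton ws c ih =>
    have hc := hw c (by simp)
    rw [← List.append_assoc, pv_pieces_snoc p c hc (hsp c hc), ih (fun d hd => hw d (by simp [hd]))]

theorem pv_pieces_lstrip (p : Char → Bool) (hsp : ∀ c, PySem.Chars.isspace c = true → p c = false)
    (m : List Char) : pvPiecesC p (PySem.Chars.lstrip m) = pvPiecesC p m := by
  induction m with
  | nil => simp [PySem.Chars.lstrip]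
  | cons c t ih =>
    by_cases hc : PySem.Chars.isspace c = true
    · rw [show PySem.Chars.lstrip (c :: t) = PySem.Chars.lstrip t by
        simp [PySem.Chars.lstrip, List.dropWhile_cons, hc], ih, pv_pieces_cons p c hc (hsp c hc)]
    · simp only [Bool.not_eq_true] at hc
      simp [PySem.Chars.lstrip, List.dropWhile_cons, hc]

theorem pv_pieces_strip (p : Char → Bool) (hsp : ∀ c, PySem.Chars.isspace c = true → p c = false)
    (m : List Char) : pvPiecesC p (PySem.Chars.strip m) = pvPiecesC p m := by
  have hdecomp : PySem.Chars.rstrip (PySem.Chars.lstrip m) ++ ((PySem.Chars.lstrip m).reverse.takeWhile PySem.Chars.isspace).reverse = PySem.Chars.lstrip m := by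
    simp only [PySem.Chars.rstrip]
    rw [← List.reverse_append, List.takeWhile_append_dropWhile, List.reverse_reverse]
  calc pvPiecesC p (PySem.Chars.strip m)
      = pvPiecesC p (PySem.Chars.rstrip (PySem.Chars.lstrip m) ++ ((PySem.Chars.lstrip m).reverse.takeWhile PySem.Chars.isspace).reverse) := by
        rw [PySem.Chars.strip, pv_pieces_append_space p hsp _ _ (fun d hd => by
          have := List.mem_reverse.mp hd
          exact List.mem_takeWhile_imp this)]
  _ = pvPiecesC p (PySem.Chars.lstrip m) := by rw [hdecomp]
  _ = pvPiecesC p m := pv_pieces_lstrip p hsp m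

theorem pv_strip_nil_all_space (m : List Char) (h : PySem.Chars.strip m = []) :
    ∀ c ∈ m, PySem.Chars.isspace c = true := by
  have h1 : ∀ c ∈ PySem.Chars.lstrip m, PySem.Chars.isspace c = true := by
    intro c hc
    have h2 : (PySem.Chars.lstrip m).reverse.dropWhile PySem.Chars.isspace = [] := by
      simpa [PySem.Chars.strip, PySem.Chars.rstrip] using h
    exact List.dropWhile_eq_nil_iff.mp h2 c (List.mem_reverse.mpr hc)
  intro c hc
  rcases List.append_of_mem hc with ⟨u, v, rfl⟩
  by_cases hall : ∀ d ∈ u ++ c :: v, PySem.Chars.isspace d = true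
  · exact hall c (by simp)
  · have : PySem.Chars.lstrip (u ++ c :: v) = (u ++ c :: v).dropWhile PySem.Chars.isspace := rfl
    have hmem : c ∈ PySem.Chars.lstrip (u ++ c :: v) ∨ PySem.Chars.isspace c = true := by
      by_cases hc2 : PySem.Chars.isspace c = true
      · exact Or.inr hc2
      · left
        rw [this]
        have := List.takeWhile_append_dropWhile (p := PySem.Chars.isspace) (l := u ++ c :: v)
        by_contra hnot
        have hctk : c ∈ (u ++ c :: v).takeWhile PySem.Chars.isspace := by
          have : c ∈ (u ++ c :: v).takeWhile PySem.Chars.isspace ++ (u ++ c :: v).dropWhile PySem.Chars.isspace := by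
            rw [List.takeWhile_append_dropWhile]; simp
          exact (List.mem_append.mp this).elim id (fun hh => absurd hh hnot)
        exact hc2 (List.mem_takeWhile_imp hctk)
    rcases hmem with hm | hm
    · exact h1 c hm
    · exact hm

theorem pv_pieces_of_strip_nil (p : Char → Bool) (hsp : ∀ c, PySem.Chars.isspace c = true → p c = false)
    (m : List Char) (h : PySem.Chars.strip m = []) : pvPiecesC p m = [] := by
  have hall := pv_strip_nil_all_space m h
  have := pv_split_nodelim p m (fun c hc => hsp c (hall c hc))
  simp [pvPiecesC, pvFull, this, h]

theorem pv_inner_foldl (L : List (List Char)) : ∀ (parts : List String),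
    L.foldl (fun parts sub =>
        let sub := PySem.Chars.strip sub
        if sub = [] then parts else parts ++ [String.ofList sub]) parts
      = parts ++ ((L.map PySem.Chars.strip).filter (· ≠ [])).map String.ofList := by
  induction L with
  | nil => simp
  | cons x xs ih =>
    intro parts
    by_cases hx : PySem.Chars.strip x = []
    · simp only [List.foldl_cons, hx, if_pos rfl, ih, List.map_cons, List.filter_cons]
      simp [hx]
    · simp only [List.foldl_cons, hx, if_neg hx, ih, List.map_cons, List.filter_cons]
      simp [hx]

theorem pv_filter_flatMap (L : List (List Char)) (h : List Char → List (List Char))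
    (P : List Char → Bool) :
    L.flatMap (fun s => (h s).filter P) = (L.flatMap h).filter P := by
  induction L with
  | nil => simp
  | cons x xs ih => simp [List.flatMap_cons, List.filter_append, ih]

theorem pv_flat_pieces (l : List Char) :
    (pvFull pvQ1 l).flatMap (pvPiecesC pvQ2) = pvPiecesC pvQ l := by
  rw [show pvPiecesC pvQ2 = (fun s => ((pvFull pvQ2 s).map PySem.Chars.strip).filter (· ≠ [])) from rfl]
  simp only [pvPiecesC]
  rw [pv_filter_flatMap (pvFull pvQ1 l) (fun s => (pvFull pvQ2 s).map PySem.Chars.strip) (· ≠ [])]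
  rw [← List.map_flatMap]
  rw [← pv_compose]

theorem pvA_parts (l : List Char) :
    (pvFull pvQ1 l).foldl
      (fun parts seg =>
        let seg := PySem.Chars.strip seg
        if seg = [] then parts
        else
          (PySem.Chars.splitOn (PySem.Chars.replace seg [','] [';']) [';']).foldl
            (fun parts sub =>
              let sub := PySem.Chars.strip sub
              if sub = [] then parts else parts ++ [String.ofList sub]) parts) []
    = (pvPiecesC pvQ l).map String.ofList := by
  have hbody : ∀ (parts : List String) (seg : List Char),
      (let seg' := PySem.Chars.strip seg
       if seg' = [] then parts
       else
         (PySem.Chars.splitOn (PySem.Chars.replace seg' [','] [';']) [';']).foldl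
           (fun parts sub =>
             let sub := PySem.Chars.strip sub
             if sub = [] then parts else parts ++ [String.ofList sub]) parts)
      = parts ++ (pvPiecesC pvQ2 seg).map String.ofList := by
    intro parts seg
    by_cases hs : PySem.Chars.strip seg = []
    · simp only [hs, if_pos rfl, pv_pieces_of_strip_nil pvQ2 pvQ2_space seg hs]
      simp
    · simp only [if_neg hs, pvA_inner, pv_inner_foldl]
      rw [show ((pvFull pvQ2 (PySem.Chars.strip seg)).map PySem.Chars.strip).filter (· ≠ []) = pvPiecesC pvQ2 (PySem.Chars.strip seg) from rfl]
      rw [pv_pieces_strip pvQ2 pvQ2_space seg]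
  rw [show (fun (parts : List String) (seg : List Char) =>
        let seg := PySem.Chars.strip seg
        if seg = [] then parts
        else
          (PySem.Chars.splitOn (PySem.Chars.replace seg [','] [';']) [';']).foldl
            (fun parts sub =>
              let sub := PySem.Chars.strip sub
              if sub = [] then parts else parts ++ [String.ofList sub]) parts)
      = (fun parts seg => parts ++ (pvPiecesC pvQ2 seg).map String.ofList) from
      funext fun parts => funext fun seg => hbody parts seg]
  rw [PySem.List.foldl_append_eq_flatMap]
  rw [← List.map_flatMap, pv_flat_pieces]
  simp

theorem pvQ_cond (ch : Char) :
    (ch == '.' || ch == '?' || ch == ',' || ch == ';') = pvQ ch := by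
  simp only [pvQ, pvQ1, pvQ2, Bool.or_assoc]
  rw [Bool.or_comm (ch == ',') (ch == ';')]

theorem pv_split_prefix (buf r : List Char) (h : ∀ c ∈ buf, pvQ c = false) :
    pvSplit pvQ (buf ++ r) = (buf ++ (pvSplit pvQ r).1, (pvSplit pvQ r).2) := by
  induction buf with
  | nil => simp
  | cons c t ih =>
    have hc := h c (by simp)
    simp [pvSplit, hc, ih (fun d hd => h d (by simp [hd]))]

theorem pv_scan (m : List Char) : ∀ (parts : List String) (buf : List Char),
    (∀ c ∈ buf, pvQ c = false) →
    ((m ++ ['.']).foldl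
      (fun (st : List String × List Char) ch =>
        if ch == '.' || ch == '?' || ch == ',' || ch == ';' then
          let piece := PySem.Chars.strip st.2
          (if piece = [] then st.1 else st.1 ++ [String.ofList piece], [])
        else (st.1, st.2 ++ [ch])) (parts, buf)).1
    = parts ++ (pvPiecesC pvQ (buf ++ m)).map String.ofList := by
  induction m with
  | nil =>
    intro parts buf hbuf
    simp only [List.nil_append, List.foldl_cons, List.foldl_nil]
    rw [pvQ_cond]
    have : pvQ '.' = true := by decide
    rw [this]
    simp only [if_true]
    have hnod := pv_split_nodelim pvQ buf hbuf
    by_cases hs : PySem.Chars.strip buf = []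
    · simp [hs, pvPiecesC, pvFull, hnod]
    · simp [hs, pvPiecesC, pvFull, hnod]
  | cons c m' ih =>
    intro parts buf hbuf
    simp only [List.cons_append, List.foldl_cons]
    rw [pvQ_cond]
    by_cases hc : pvQ c = true
    · rw [hc]
      simp only [if_true]
      rw [ih _ [] (by simp)]
      have hsplit : pvFull pvQ (buf ++ c :: m') = buf :: pvFull pvQ m' := by
        simp only [pvFull, pv_split_prefix buf (c :: m') hbuf, pvSplit, hc, if_true]
        simp
      by_cases hs : PySem.Chars.strip buf = []
      · simp only [hs, if_pos rfl, pvPiecesC, hsplit, List.map_cons, List.filter_cons, hs]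
        simp
      · simp only [hs, if_neg hs, pvPiecesC, hsplit, List.map_cons, List.filter_cons]
        simp [hs]
    · simp only [Bool.not_eq_true] at hc
      rw [hc]
      simp only [Bool.false_eq_true, if_false]
      rw [ih _ (buf ++ [c]) (by
        intro d hd
        rcases List.mem_append.mp hd with h1 | h1
        · exact hbuf d h1
        · simp at h1; subst h1; exact hc)]
      simp

theorem pvB_parts (l : List Char) :
    ((l ++ ['.']).foldl
      (fun (st : List String × List Char) ch =>
        if ch == '.' || ch == '?' || ch == ',' || ch == ';' then
          let piece := PySem.Chars.strip st.2
          (if piece = [] then st.1 else st.1 ++ [String.ofList piece], [])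
        else (st.1, st.2 ++ [ch])) ([], [])).1
    = (pvPiecesC pvQ l).map String.ofList := by
  rw [pv_scan l [] [] (by simp)]
  simp

-- ===== VERDICT (by name: the statement is the Claim_ definition above) =====
theorem decompose_query_py_spec : Claim_equal_decompose_query_py := by
  intro query _
  unfold Spec_decompose_query_py decompose_query_py decompose_query_py_alt
  have hl : (query ++ ".").toList = query.toList ++ ['.'] := by simp
  dsimp only
  rw [hl, pvB_parts, pvA_outer, pvA_parts]
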